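-- pv_equiv track=rewrite | github.com/aryanag7/Leetcode-Solutions | Strings/Generate a String With Characters That Have Odd Counts.py | generateTheString
-- ===== SOURCE A (Python) =====
-- def generateTheString(n: int) -> str:
--     string=""
--     if n%2==0:
--         while n-1>0:
--             string+="a"
--             n=n-1
--         string+="b"
--     else:
--
--         while n>0:
--             string+="a"
--             n=n-1
--     return string
-- ===== SOURCE B (Python) =====
-- def generateTheString(n: int) -> str:
--     if n % 2 == 0:
--         return "a" * (n - 1) + "b"
--     return "a" * n
-- ===== Notes on version B (the rewrite author's own statement) =====
-- stated objective: faster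
-- what changed: Replaces both character-by-character while loops with a closed-form string-repetition expression per parity branch.
import Mathlib
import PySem

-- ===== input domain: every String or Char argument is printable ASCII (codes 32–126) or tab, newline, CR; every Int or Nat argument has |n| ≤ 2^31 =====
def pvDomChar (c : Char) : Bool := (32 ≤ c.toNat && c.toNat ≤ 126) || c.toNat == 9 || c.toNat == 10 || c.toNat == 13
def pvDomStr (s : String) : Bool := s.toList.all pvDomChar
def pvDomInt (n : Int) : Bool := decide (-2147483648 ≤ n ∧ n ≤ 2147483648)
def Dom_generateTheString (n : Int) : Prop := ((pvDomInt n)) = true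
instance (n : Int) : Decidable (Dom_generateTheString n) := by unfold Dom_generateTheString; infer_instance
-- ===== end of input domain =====

-- B replaces A's two character-by-character while loops by the closed-form construction
-- "a"*(n-1)+"b" / "a"*n (objective: simpler; avoids repeated concatenation).

-- ===== PORT A =====
-- while n-1>0: string+="a"; n=n-1   (even branch)
def pvLoopEven (n : Int) (s : String) : String :=
  if _h : n - 1 > 0 then pvLoopEven (n - 1) (s ++ "a") else s
termination_by (n - 1).toNat
decreasing_by simp_wf; omega

-- while n>0: string+="a"; n=n-1   (odd branch)
def pvLoopOdd (n : Int) (s : String) : String :=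
  if _h : n > 0 then pvLoopOdd (n - 1) (s ++ "a") else s
termination_by n.toNat
decreasing_by simp_wf; omega

def generateTheString (n : Int) : String :=
  if PySem.Int.mod n 2 = 0 then pvLoopEven n "" ++ "b"
  else pvLoopOdd n ""

-- ===== PORT B =====
def generateTheString_alt (n : Int) : String :=
  if PySem.Int.mod n 2 = 0 then String.ofList (PySem.List.pyRepeat ['a'] (n - 1)) ++ "b"
  else String.ofList (PySem.List.pyRepeat ['a'] n)

-- ===== PRECONDITION & SPEC =====
def Spec_generateTheString (n : Int) (out : String) : Prop := out = generateTheString_alt n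
instance (n : Int) (out : String) : Decidable (Spec_generateTheString n out) := by unfold Spec_generateTheString; infer_instance

-- ===== CLAIM (what is proved, stated in full; the proofs are below) =====
def Claim_equal_generateTheString : Prop := ∀ (n : Int), Dom_generateTheString n → Spec_generateTheString n (generateTheString n)

-- ===== LEMMAS AND PROOFS =====

theorem pvLoopOdd_eq (n : Int) (s : String) :
    pvLoopOdd n s = s ++ String.ofList (List.replicate n.toNat 'a') := by
  induction n, s using pvLoopOdd.induct with
  | case1 n s h ih =>
      rw [pvLoopOdd, dif_pos h, ih]
      have hn : n.toNat = (n - 1).toNat + 1 := by omega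
      rw [hn, List.replicate_succ, ← String.toList_inj]
      simp
  | case2 n s h =>
      rw [pvLoopOdd, dif_neg h]
      have hn : n.toNat = 0 := by omega
      rw [← String.toList_inj]
      simp [hn]

theorem pvLoopEven_eq (n : Int) (s : String) :
    pvLoopEven n s = s ++ String.ofList (List.replicate (n - 1).toNat 'a') := by
  induction n, s using pvLoopEven.induct with
  | case1 n s h ih =>
      rw [pvLoopEven, dif_pos h, ih]
      have hn : (n - 1).toNat = (n - 1 - 1).toNat + 1 := by omega
      rw [hn, List.replicate_succ, ← String.toList_inj]
      simp
  | case2 n s h =>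
      rw [pvLoopEven, dif_neg h]
      have hn : (n - 1).toNat = 0 := by omega
      rw [← String.toList_inj]
      simp [hn]

-- ===== VERDICT (by name: the statement is the Claim_ definition above) =====
theorem generateTheString_spec : Claim_equal_generateTheString := by
  intro n _
  unfold Spec_generateTheString generateTheString generateTheString_alt
  rw [PySem.List.pyRepeat_singleton, PySem.List.pyRepeat_singleton,
      pvLoopEven_eq, pvLoopOdd_eq]
  split_ifs <;> (rw [← String.toList_inj]; simp)
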